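-- pv_equiv track=rewrite | github.com/enigmAsad/ticketing-service | src/ticketing_service/main.py | _available_seat_ranges
-- ===== SOURCE A (Python) =====
-- def _available_seat_ranges(total_seats: int, booked_set: set[int]) -> list[list[int]]:
--     ranges: list[list[int]] = []
--     start = None
--     for seat_number in range(1, total_seats + 1):
--         if seat_number in booked_set:
--             if start is not None:
--                 ranges.append([start, seat_number - 1])
--                 start = None
--             continue
--         if start is None:
--             start = seat_number
--     if start is not None:
--         ranges.append([start, total_seats])
--     return ranges
-- ===== SOURCE B (Python) =====
-- def _available_seat_ranges(total_seats: int, booked_set: set[int]) -> list[list[int]]: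
--     ranges: list[list[int]] = []
--     prev = 0
--     for b in sorted(x for x in booked_set if 1 <= x <= total_seats):
--         if prev + 1 <= b - 1:
--             ranges.append([prev + 1, b - 1])
--         prev = b
--     if prev + 1 <= total_seats:
--         ranges.append([prev + 1, total_seats])
--     return ranges
-- ===== Notes on version B (the rewrite author's own statement) =====
-- stated objective: alternative
-- what changed: Instead of scanning every seat 1..total_seats and tracking an open-range start, B sorts the in-range booked seats and emits the gap before each consecutive booked seat and the tail gap.
import Mathlib
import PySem

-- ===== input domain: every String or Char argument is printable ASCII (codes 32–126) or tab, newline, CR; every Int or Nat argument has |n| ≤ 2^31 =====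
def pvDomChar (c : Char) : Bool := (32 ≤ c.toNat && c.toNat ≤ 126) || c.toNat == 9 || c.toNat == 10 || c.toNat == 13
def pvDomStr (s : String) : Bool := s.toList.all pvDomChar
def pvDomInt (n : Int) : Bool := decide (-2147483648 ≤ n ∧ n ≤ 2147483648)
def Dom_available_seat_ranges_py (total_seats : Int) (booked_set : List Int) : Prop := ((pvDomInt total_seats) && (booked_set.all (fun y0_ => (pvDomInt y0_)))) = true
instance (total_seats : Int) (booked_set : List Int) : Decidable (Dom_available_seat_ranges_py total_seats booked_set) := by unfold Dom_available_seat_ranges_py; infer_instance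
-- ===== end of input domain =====

-- B replaces A's per-seat scan over 1..total_seats by sorting the in-range booked seats and
-- emitting the gap before each consecutive booked seat (objective: alternative algorithm).

-- ===== PORT A =====
-- loop body of A: state = (ranges, start); branches in A's order
def asrStepA (booked_set : List Int) (acc : List (List Int) × Option Int) (seat_number : Int) :
    List (List Int) × Option Int :=
  if seat_number ∈ booked_set then
    match acc.2 with
    | some start => (acc.1 ++ [[start, seat_number - 1]], none)
    | none => acc
  else
    match acc.2 with
    | none => (acc.1, some seat_number)
    | some _ => acc

def available_seat_ranges_py (total_seats : Int) (booked_set : List Int) : List (List Int) :=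
  let st := (PySem.List.pyRange 1 (total_seats + 1)).foldl (asrStepA booked_set) ([], none)
  match st.2 with
  | some start => st.1 ++ [[start, total_seats]]
  | none => st.1

-- ===== PORT B =====
-- loop body of B: state = (ranges, prev); emit the gap before b, then prev := b
def asrStepB (acc : List (List Int) × Int) (b : Int) : List (List Int) × Int :=
  (if acc.2 + 1 ≤ b - 1 then acc.1 ++ [[acc.2 + 1, b - 1]] else acc.1, b)

def available_seat_ranges_py_alt (total_seats : Int) (booked_set : List Int) : List (List Int) :=
  let rel := PySem.List.sorted
    (booked_set.filter (fun x => decide (1 ≤ x) && decide (x ≤ total_seats))) (fun x => x)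
  let st := rel.foldl asrStepB ([], 0)
  if st.2 + 1 ≤ total_seats then st.1 ++ [[st.2 + 1, total_seats]] else st.1

-- ===== PRECONDITION & SPEC =====
def Spec_available_seat_ranges_py (total_seats : Int) (booked_set : List Int) (out : List (List Int)) : Prop := out = available_seat_ranges_py_alt total_seats booked_set
instance (total_seats : Int) (booked_set : List Int) (out : List (List Int)) : Decidable (Spec_available_seat_ranges_py total_seats booked_set out) := by unfold Spec_available_seat_ranges_py; infer_instance

-- ===== CLAIM (what is proved, stated in full; the proofs are below) =====
def Claim_equal_available_seat_ranges_py : Prop := ∀ (total_seats : Int) (booked_set : List Int), Dom_available_seat_ranges_py total_seats booked_set → Spec_available_seat_ranges_py total_seats booked_set (available_seat_ranges_py total_seats booked_set)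

-- ===== LEMMAS AND PROOFS =====

-- abbreviations for the two loop states after processing seats 1..n
def asrA (booked_set : List Int) (n : Nat) : List (List Int) × Option Int :=
  (PySem.List.pyRange 1 ((n : Int) + 1)).foldl (asrStepA booked_set) ([], none)

def asrRel (booked_set : List Int) (n : Nat) : List Int :=
  PySem.List.sorted
    (booked_set.filter (fun x => decide (1 ≤ x) && decide (x ≤ (n : Int)))) (fun x => x)

def asrB (booked_set : List Int) (n : Nat) : List (List Int) × Int :=
  (asrRel booked_set n).foldl asrStepB ([], 0)

-- the filtered multiset grows at n+1 exactly by the copies of n+1 in booked_set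
lemma asr_filter_succ_perm (s : List Int) (n : Nat) :
    (s.filter (fun x => decide (1 ≤ x) && decide (x ≤ (n : Int) + 1))).Perm
      ((s.filter (fun x => decide (1 ≤ x) && decide (x ≤ (n : Int)))) ++
        List.replicate (s.count ((n : Int) + 1)) ((n : Int) + 1)) := by
  induction s with
  | nil => simp
  | cons a t ih =>
    by_cases hav : a = (n : Int) + 1
    · subst hav
      have h1 : (decide (1 ≤ (n : Int) + 1) && decide ((n : Int) + 1 ≤ (n : Int) + 1)) = true := by
        simp
      have h2 : (decide (1 ≤ (n : Int) + 1) && decide ((n : Int) + 1 ≤ (n : Int))) = false := by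
        simp
      simp only [List.filter_cons, h1, h2, List.count_cons_self, if_true,
        List.replicate_succ]
      exact (ih.cons _).trans (List.perm_middle.symm)
    · have hcnt : (a :: t).count ((n : Int) + 1) = t.count ((n : Int) + 1) := by
        simp [hav]
      by_cases hp : (decide (1 ≤ a) && decide (a ≤ (n : Int))) = true
      · have hp' : (decide (1 ≤ a) && decide (a ≤ (n : Int) + 1)) = true := by
          simp at hp ⊢; omega
        simp only [List.filter_cons, hp, hp', hcnt, if_true, List.cons_append]
        exact ih.cons _
      · have hp' : (decide (1 ≤ a) && decide (a ≤ (n : Int) + 1)) = false := by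
          simp at hp ⊢; omega
        simp only [Bool.not_eq_true] at hp
        simp only [List.filter_cons, hp, hp', hcnt, if_false, Bool.false_eq_true]
        exact ih
  
-- hence the sorted relevant list grows at the right end
lemma asr_rel_succ (s : List Int) (n : Nat) :
    asrRel s (n + 1) =
      asrRel s n ++ List.replicate (s.count ((n : Int) + 1)) ((n : Int) + 1) := by
  unfold asrRel
  have hcast : ((n + 1 : Nat) : Int) = (n : Int) + 1 := by push_cast; ring
  rw [hcast]
  apply PySem.List.sorted_id_eq_of_perm_of_pairwise
  · exact ((PySem.List.sorted_perm _ _ _).append_right _).trans (asr_filter_succ_perm s n).symm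
  · apply List.pairwise_append.mpr
    refine ⟨?_, ?_, ?_⟩
    · exact PySem.List.sorted_pairwise _ _
    · exact List.pairwise_replicate.mpr (Or.inr le_rfl)
    · intro x hx y hy
      have hx' := (PySem.List.mem_sorted _ _ _ _).mp hx
      have hxb := List.of_mem_filter hx'
      have hy' := List.eq_of_mem_replicate hy
      simp only [Bool.and_eq_true, decide_eq_true_eq] at hxb
      omega

-- once prev = v, further copies of v do nothing
lemma asr_foldl_replicate_fix (R : List (List Int)) (v : Int) (k : Nat) :
    (List.replicate k v).foldl asrStepB (R, v) = (R, v) := by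
  induction k with
  | zero => rfl
  | succ k ih =>
    rw [List.replicate_succ, List.foldl_cons]
    have : asrStepB (R, v) v = (R, v) := by
      unfold asrStepB; simp
    rw [this, ih]

-- the invariant linking the two loop states after seats 1..n
lemma asr_inv (s : List Int) (n : Nat) :
    (asrB s n).2 ≤ (n : Int) ∧
      asrA s n = ((asrB s n).1,
        if (asrB s n).2 = (n : Int) then none else some ((asrB s n).2 + 1)) := by
  induction n with
  | zero =>
    constructor
    · show (asrB s 0).2 ≤ 0
      have : asrRel s 0 = [] := by
        unfold asrRel
        have : s.filter (fun x => decide (1 ≤ x) && decide (x ≤ ((0 : Nat) : Int))) = [] := by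
          apply List.filter_eq_nil_iff.mpr
          intro a _; simp; omega
        rw [this]; rfl
      unfold asrB; rw [this]; simp
    · have hrel : asrRel s 0 = [] := by
        unfold asrRel
        have : s.filter (fun x => decide (1 ≤ x) && decide (x ≤ ((0 : Nat) : Int))) = [] := by
          apply List.filter_eq_nil_iff.mpr
          intro a _; simp; omega
        rw [this]; rfl
      have hA : asrA s 0 = ([], none) := by
        unfold asrA
        rw [PySem.List.pyRange_one_eq_nil (by norm_num)]
        rfl
      unfold asrB
      rw [hrel, hA]; simp
  | succ n ih =>
    obtain ⟨hle, hAeq⟩ := ih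
    -- unfold the A side one step
    have hcast : ((n + 1 : Nat) : Int) = (n : Int) + 1 := by push_cast; ring
    have hAstep : asrA s (n + 1) = asrStepA s (asrA s n) ((n : Int) + 1) := by
      unfold asrA
      rw [hcast, PySem.List.pyRange_one_succ_right (by omega), List.foldl_append]
      rfl
    have hBstep : asrB s (n + 1) =
        (List.replicate (s.count ((n : Int) + 1)) ((n : Int) + 1)).foldl asrStepB (asrB s n) := by
      unfold asrB
      rw [asr_rel_succ, List.foldl_append]
    by_cases hmem : ((n : Int) + 1) ∈ s
    · -- seat n+1 is booked
      have hcnt : ∃ k, s.count ((n : Int) + 1) = k + 1 := by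
        have := List.count_pos_iff.mpr hmem
        exact ⟨s.count ((n : Int) + 1) - 1, by omega⟩
      obtain ⟨k, hk⟩ := hcnt
      -- compute B's new state
      have hBnew : asrB s (n + 1) = ((asrStepB (asrB s n) ((n : Int) + 1)).1, (n : Int) + 1) := by
        rw [hBstep, hk, List.replicate_succ, List.foldl_cons]
        have h2 : asrStepB (asrB s n) ((n : Int) + 1)
            = ((asrStepB (asrB s n) ((n : Int) + 1)).1, (n : Int) + 1) := rfl
        rw [h2]
        exact asr_foldl_replicate_fix _ _ _
      by_cases hprev : (asrB s n).2 = (n : Int)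
      · -- start was none; no gap to emit
        refine ⟨by rw [hBnew]; omega, ?_⟩
        rw [hAstep, hAeq, hBnew]
        unfold asrStepA asrStepB
        simp only [hmem, if_pos, hprev]
        have hno : ¬ ((n : Int) + 1 ≤ (n : Int) + 1 - 1) := by omega
        simp [hcast]
      · -- start = some (prev+1); emit [prev+1, n]
        refine ⟨by rw [hBnew]; omega, ?_⟩
        rw [hAstep, hAeq, hBnew]
        unfold asrStepA asrStepB
        simp only [hmem, if_pos, hprev]
        have hyes : (asrB s n).2 + 1 ≤ (n : Int) + 1 - 1 := by omega
        simp [hcast]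
        omega
    · -- seat n+1 is free
      have hk0 : s.count ((n : Int) + 1) = 0 := List.count_eq_zero.mpr hmem
      have hBnew : asrB s (n + 1) = asrB s n := by
        rw [hBstep, hk0]; rfl
      by_cases hprev : (asrB s n).2 = (n : Int)
      · refine ⟨by rw [hBnew]; omega, ?_⟩
        rw [hAstep, hAeq, hBnew]
        unfold asrStepA
        simp only [hmem, hprev]
        have hne : ¬ ((asrB s n).2 = (n : Int) + 1) := by omega
        simp
      · refine ⟨by rw [hBnew]; omega, ?_⟩
        rw [hAstep, hAeq, hBnew]
        unfold asrStepA
        simp only [hmem, hprev]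
        have hne : ¬ ((asrB s n).2 = (n : Int) + 1) := by omega
        simp [hne]

-- assemble the final results for a nonnegative seat count
lemma asr_main_nat (s : List Int) (n : Nat) :
    available_seat_ranges_py (n : Int) s = available_seat_ranges_py_alt (n : Int) s := by
  obtain ⟨hle, hAeq⟩ := asr_inv s n
  unfold available_seat_ranges_py available_seat_ranges_py_alt
  have hA : (PySem.List.pyRange 1 ((n : Int) + 1)).foldl (asrStepA s) ([], none) = asrA s n := rfl
  have hB : (PySem.List.sorted
      (s.filter (fun x => decide (1 ≤ x) && decide (x ≤ (n : Int)))) (fun x => x)).foldl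
        asrStepB ([], 0) = asrB s n := rfl
  simp only [hA, hB, hAeq]
  by_cases hprev : (asrB s n).2 = (n : Int)
  · have hno : ¬ ((asrB s n).2 + 1 ≤ (n : Int)) := by omega
    simp [hprev]
  · have hyes : (asrB s n).2 + 1 ≤ (n : Int) := by omega
    simp [hprev, hyes]

-- ===== VERDICT (by name: the statement is the Claim_ definition above) =====
theorem available_seat_ranges_py_spec : Claim_equal_available_seat_ranges_py := by
  intro total_seats booked_set _
  show available_seat_ranges_py total_seats booked_set
      = available_seat_ranges_py_alt total_seats booked_set
  by_cases hpos : 0 ≤ total_seats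
  · obtain ⟨n, rfl⟩ := Int.eq_ofNat_of_zero_le hpos
    exact asr_main_nat booked_set n
  · have hneg : total_seats < 0 := by omega
    unfold available_seat_ranges_py available_seat_ranges_py_alt
    have h1 : PySem.List.pyRange 1 (total_seats + 1) = [] :=
      PySem.List.pyRange_one_eq_nil (by omega)
    have h2 : booked_set.filter (fun x => decide (1 ≤ x) && decide (x ≤ total_seats)) = [] := by
      apply List.filter_eq_nil_iff.mpr
      intro a _; simp; omega
    rw [h1, h2]
    have h3 : ¬ ((0 : Int) + 1 ≤ total_seats) := by omega
    simp [PySem.List.sorted]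
    omega
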